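-- pv_equiv track=rewrite | github.com/jumper-hash/cyber-security-notes | code-projects/hosts-manager/hosts-manager.py | get_last_index
-- ===== SOURCE A (Python) =====
-- separator="#====="
--
-- def get_last_index(lines):
--     if not lines:
--         return 0
--
--     system_end_point = 0
--     for i, el in enumerate(lines):
--         if separator in el:
--             system_end_point = i
--
--     last_valid = system_end_point
--     for i in range(system_end_point + 1, len(lines)):
--         if lines[i].strip():
--             last_valid = i
--
--     return last_valid
-- ===== SOURCE B (Python) =====
-- separator = "#====="
--
-- def get_last_index(lines):
--     best = None
--     for i in range(len(lines) - 1, -1, -1):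
--         if separator in lines[i]:
--             return best if best is not None else i
--         if best is None and lines[i].strip():
--             best = i
--     return best if best is not None else 0
-- ===== Notes on version B (the rewrite author's own statement) =====
-- stated objective: alternative
-- what changed: B replaces A's two full forward passes (last separator index, then last non-blank index after it) by a single backward scan with early exit that tracks the highest non-blank index seen so far and returns as soon as a separator line is met.
import Mathlib
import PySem

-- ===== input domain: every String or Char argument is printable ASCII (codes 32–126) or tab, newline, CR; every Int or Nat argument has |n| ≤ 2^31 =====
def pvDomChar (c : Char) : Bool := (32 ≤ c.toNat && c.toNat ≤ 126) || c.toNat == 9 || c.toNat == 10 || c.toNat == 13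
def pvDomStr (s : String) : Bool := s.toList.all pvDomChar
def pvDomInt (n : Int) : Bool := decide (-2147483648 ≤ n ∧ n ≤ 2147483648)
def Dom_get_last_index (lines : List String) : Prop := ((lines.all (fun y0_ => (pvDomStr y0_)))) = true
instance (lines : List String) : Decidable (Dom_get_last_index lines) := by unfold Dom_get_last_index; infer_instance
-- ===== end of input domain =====

-- B replaces A's two full forward passes by a single backward scan with early exit; same return value, objective: alternative decomposition (no speed claim).

-- module constant 'separator' shared by both programs
def pvSep : String := "#====="

-- ===== PORT A =====
-- lines[i] in A's second loop is always in range (s+1 ≤ i < len(lines)), so pyGetD is exact there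
def get_last_index (lines : List String) : Int :=
  if lines = [] then 0
  else
    let s := (PySem.List.enumerate lines).foldl
      (fun acc p => if PySem.Str.isIn pvSep p.2 then p.1 else acc) 0
    (PySem.List.pyRange (s + 1) (lines.length : Int)).foldl
      (fun acc i => if !(PySem.Str.strip (PySem.List.pyGetD lines i "") == "") then i else acc) s

-- ===== PORT B =====
-- 'if best is None and lines[i].strip(): best = i'
def pvUpd (best : Option Nat) (i : Nat) (line : String) : Option Nat :=
  if best.isNone && !(PySem.Str.strip line == "") then some i else best

-- the backward for-loop of B, index descending from len(lines)-1 to 0; early return on a separator line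
def pvLoop (lines : List String) : Nat → Option Nat → Int
  | 0, best =>
    let line := PySem.List.pyGetD lines ((0 : Nat) : Int) ""
    if PySem.Str.isIn pvSep line then ((best.getD 0 : Nat) : Int)
    else (((pvUpd best 0 line).getD 0 : Nat) : Int)
  | (i+1), best =>
    let line := PySem.List.pyGetD lines ((i + 1 : Nat) : Int) ""
    if PySem.Str.isIn pvSep line then ((best.getD (i+1) : Nat) : Int)
    else pvLoop lines i (pvUpd best (i+1) line)

def get_last_index_alt (lines : List String) : Int :=
  match lines.length with
  | 0 => 0
  | n + 1 => pvLoop lines n none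

-- ===== PRECONDITION & SPEC =====
def Spec_get_last_index (lines : List String) (out : Int) : Prop := out = get_last_index_alt lines
instance (lines : List String) (out : Int) : Decidable (Spec_get_last_index lines out) := by unfold Spec_get_last_index; infer_instance

-- ===== CLAIM (what is proved, stated in full; the proofs are below) =====
def Claim_equal_get_last_index : Prop := ∀ (lines : List String), Dom_get_last_index lines → Spec_get_last_index lines (get_last_index lines)

-- ===== LEMMAS AND PROOFS =====

-- proof-only abbreviations for the two line tests
def pvP (l : String) : Bool := PySem.Str.isIn pvSep l
def pvQ (l : String) : Bool := !(PySem.Str.strip l == "")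

-- index of the LAST element satisfying p, if any
def lastIdx (p : String → Bool) : List String → Option Nat
  | [] => none
  | x :: xs =>
    match lastIdx p xs with
    | some j => some (j + 1)
    | none => if p x then some 0 else none

lemma lastIdx_append_singleton (p : String → Bool) (xs : List String) (x : String) :
    lastIdx p (xs ++ [x]) = if p x then some xs.length else lastIdx p xs := by
  induction xs with
  | nil => cases hp : p x <;> simp [lastIdx, hp]
  | cons y ys ih =>
    cases hp : p x <;> simp only [List.cons_append, lastIdx, ih, hp] <;> rfl

-- A's first loop: last index of a separator line, default the accumulator
lemma enumFold (xs : List String) : ∀ (st acc : Int),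
    (PySem.List.enumerate xs st).foldl
        (fun acc p => if PySem.Str.isIn pvSep p.2 then p.1 else acc) acc
      = match lastIdx pvP xs with | some j => st + (j : Int) | none => acc := by
  induction xs with
  | nil => intro st acc; simp [PySem.List.enumerate_nil, lastIdx]
  | cons x xs ih =>
    intro st acc
    rw [PySem.List.enumerate_cons]
    simp only [List.foldl_cons]
    rw [ih]
    cases h : lastIdx pvP xs with
    | some j => simp only [lastIdx, h]; push_cast; ring
    | none =>
      simp only [lastIdx, h, pvP]
      by_cases hp : PySem.Str.isIn pvSep x = true
      · simp only [hp]; simp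
      · rw [Bool.not_eq_true] at hp; simp only [hp]; simp

-- A's second loop: last index in [a, len) whose line strips non-empty, default the accumulator
lemma rangeFold (lines : List String) : ∀ (k a : Nat) (acc : Int), lines.length - a = k →
    (PySem.List.pyRange ((a : Nat) : Int) (lines.length : Int)).foldl
        (fun acc i => if !(PySem.Str.strip (PySem.List.pyGetD lines i "") == "") then i else acc) acc
      = match lastIdx pvQ (lines.drop a) with
        | some j => ((a + j : Nat) : Int)
        | none => acc := by
  intro k
  induction k with
  | zero =>
    intro a acc hk
    have ha : lines.length ≤ a := by omega
    rw [PySem.List.pyRange_one_eq_nil (by exact_mod_cast ha)]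
    rw [List.drop_eq_nil_of_le ha]
    simp [lastIdx]
  | succ k ih =>
    intro a acc hk
    have ha : a < lines.length := by omega
    rw [PySem.List.pyRange_one_cons (by exact_mod_cast ha)]
    simp only [List.foldl_cons]
    rw [show ((a : Nat) : Int) + 1 = ((a + 1 : Nat) : Int) by push_cast; ring]
    rw [ih (a + 1) _ (by omega)]
    rw [List.drop_eq_getElem_cons ha]
    have hg : PySem.List.pyGetD lines ((a : Nat) : Int) "" = lines[a] := by
      rw [PySem.List.pyGetD_natCast]; exact List.getD_eq_getElem lines "" ha
    rw [hg]
    cases h : lastIdx pvQ (lines.drop (a + 1)) with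
    | some j =>
      simp only [lastIdx, h]
      exact congrArg _ (by omega)
    | none =>
      simp only [lastIdx, h, pvQ]
      by_cases hq : (!(PySem.Str.strip lines[a] == "")) = true
      · simp only [hq]; simp
      · rw [Bool.not_eq_true] at hq; simp only [hq]; simp

-- the common value both programs compute, phrased over last-index specs
def pvTarget (lines : List String) (i : Nat) : Int :=
  match lastIdx pvP (lines.take (i + 1)) with
  | some s =>
    match lastIdx pvQ (lines.drop (s + 1)) with
    | some j => ((s + 1 + j : Nat) : Int)
    | none => ((s : Nat) : Int)
  | none => (((lastIdx pvQ lines).getD 0 : Nat) : Int)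

lemma pvLoop_spec (lines : List String) : ∀ (i : Nat), i < lines.length →
    (∀ j (_ : j < lines.length), i < j → pvP (lines[j]'(by omega)) = false) →
    pvLoop lines i ((lastIdx pvQ (lines.drop (i + 1))).map (fun j => i + 1 + j)) = pvTarget lines i := by
  intro i
  induction i with
  | zero =>
    intro hlt _hsep
    obtain ⟨x, rest, rfl⟩ : ∃ x r, lines = x :: r := by
      cases lines with
      | nil => simp at hlt
      | cons x r => exact ⟨x, r, rfl⟩
    have hg : PySem.List.pyGetD (x :: rest) ((0 : Nat) : Int) "" = x := by
      rw [PySem.List.pyGetD_natCast]; rfl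
    simp only [pvLoop, hg, List.drop_succ_cons, List.drop_zero]
    cases hp : PySem.Str.isIn pvSep x with
    | true =>
      rw [if_pos rfl]
      simp only [pvTarget, List.take_succ_cons, List.take_zero, lastIdx, pvP, hp,
        List.drop_succ_cons]
      cases h : lastIdx pvQ rest with
      | some j => simp [h]
      | none => simp [h]
    | false =>
      rw [if_neg (by decide)]
      simp only [pvTarget, List.take_succ_cons, List.take_zero, lastIdx, pvP, hp]
      cases h : lastIdx pvQ rest with
      | some j =>
        simp [pvUpd]
        ring
      | none =>
        by_cases hq : (!(PySem.Str.strip x == "")) = true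
        · simp only [pvUpd, pvQ]; simp only [hq]; simp
        · rw [Bool.not_eq_true] at hq
          simp only [pvUpd, pvQ]; simp only [hq]; simp
  | succ i ihl =>
    intro hlt hsep
    have hg : PySem.List.pyGetD lines ((i + 1 : Nat) : Int) "" = lines[i + 1] := by
      rw [PySem.List.pyGetD_natCast]; exact List.getD_eq_getElem lines "" hlt
    simp only [pvLoop, hg]
    have htake : lines.take (i + 1 + 1) = lines.take (i + 1) ++ [lines[i + 1]] := by
      rw [List.take_add_one, List.getElem?_eq_getElem hlt]; rfl
    have hlen : (lines.take (i + 1)).length = i + 1 := by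
      simp [List.length_take]; omega
    cases hp : PySem.Str.isIn pvSep (lines[i + 1]) with
    | true =>
      rw [if_pos rfl]
      simp only [pvTarget, htake, lastIdx_append_singleton, pvP, hp, hlen]
      cases h : lastIdx pvQ (lines.drop (i + 1 + 1)) with
      | some j => simp [h]
      | none => simp [h]
    | false =>
      rw [if_neg (by decide)]
      have hupd : pvUpd ((lastIdx pvQ (lines.drop (i + 1 + 1))).map (fun j => i + 1 + 1 + j))
          (i + 1) (lines[i + 1])
          = (lastIdx pvQ (lines.drop (i + 1))).map (fun j => i + 1 + j) := by
        rw [List.drop_eq_getElem_cons hlt]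
        cases h : lastIdx pvQ (lines.drop (i + 1 + 1)) with
        | some j =>
          simp [pvUpd, lastIdx, h]
          omega
        | none =>
          by_cases hq : (!(PySem.Str.strip (lines[i + 1]) == "")) = true
          · simp only [pvUpd, lastIdx, pvQ, h]; simp only [hq]; simp
          · rw [Bool.not_eq_true] at hq
            simp only [pvUpd, lastIdx, pvQ, h]; simp only [hq]; simp
      rw [hupd]
      rw [ihl (by omega) (by
        intro j hj hij
        by_cases hji : j = i + 1
        · subst hji; simpa [pvP] using hp
        · exact hsep j hj (by omega))]
      simp only [pvTarget, htake, lastIdx_append_singleton, pvP, hp, hlen]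
      simp
-- ===== VERDICT (by name: the statement is the Claim_ definition above) =====
theorem get_last_index_spec : Claim_equal_get_last_index := by
  intro lines _dom
  unfold Spec_get_last_index
  cases lines with
  | nil => rfl
  | cons x rest =>
    -- B side
    have hB : get_last_index_alt (x :: rest) = pvTarget (x :: rest) rest.length := by
      have hnone : ((lastIdx pvQ ((x :: rest).drop (rest.length + 1))).map
          (fun j => rest.length + 1 + j)) = none := by
        rw [show (x :: rest).drop (rest.length + 1) = [] from
          List.drop_eq_nil_of_le (by simp)]
        rfl
      have := pvLoop_spec (x :: rest) rest.length (by simp)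
        (by intro j hj hij; simp at hj; omega)
      rw [hnone] at this
      simpa [get_last_index_alt] using this
    rw [hB]
    -- A side
    have hA1 := enumFold (x :: rest) 0 0
    simp only [get_last_index]
    rw [if_neg (List.cons_ne_nil x rest)]
    rw [hA1]
    have htake : (x :: rest).take (rest.length + 1) = x :: rest := by simp
    cases hP : lastIdx pvP (x :: rest) with
    | some s0 =>
      simp only
      rw [show (0 : Int) + (s0 : Int) + 1 = ((s0 + 1 : Nat) : Int) by push_cast; ring]
      rw [rangeFold (x :: rest) ((x :: rest).length - (s0 + 1)) (s0 + 1) _ rfl]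
      simp only [pvTarget, htake, hP]
      cases h : lastIdx pvQ ((x :: rest).drop (s0 + 1)) with
      | some j => simp
      | none => simp
    | none =>
      simp only
      rw [show (0 : Int) + 1 = ((1 : Nat) : Int) by norm_num]
      rw [rangeFold (x :: rest) ((x :: rest).length - 1) 1 _ rfl]
      simp only [pvTarget, htake, hP, List.drop_succ_cons, List.drop_zero]
      cases h : lastIdx pvQ rest with
      | some j =>
        simp [lastIdx, h]
        ring
      | none =>
        by_cases hq : pvQ x = true
        · simp [lastIdx, h, hq]
        · rw [Bool.not_eq_true] at hq; simp [lastIdx, h, hq]
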